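-- pv_equiv track=rewrite | github.com/domezsolt/ZeroProofML | scripts/plot_b012_bars.py | default_method_order
-- ===== SOURCE A (Python) =====
-- from typing import Dict, List
--
-- def default_method_order(rows: List[Dict[str, str]]) -> List[str]:
--     """Produce a reasonable default ordering for methods if none provided."""
--     names = [row["Method"] for row in rows]
--     # Prefer TR variants first, then ε grid (no clip), then ε+clip
--     priority = []
--     for n in names:
--         key = (0, n)
--         low = n.lower()
--         if "zeroproofml (full)" in low:
--             key = (0, n)
--         elif "zeroproofml (basic)" in low:
--             key = (1, n)
--         elif "no clip" in low:
--             # sort by epsilon magnitude if present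
--             key = (2, n)
--         elif "+clip" in low or "clip" in low:
--             key = (3, n)
--         priority.append((key, n))
--     priority.sort(key=lambda x: x[0])
--     ordered = [n for (_, n) in priority]
--     # Deduplicate while preserving order
--     seen = set()
--     out = []
--     for n in ordered:
--         if n not in seen:
--             seen.add(n)
--             out.append(n)
--     return out
-- ===== SOURCE B (Python) =====
-- from typing import Dict, List
--
-- def default_method_order(rows: List[Dict[str, str]]) -> List[str]:
--     """Partition names into four priority buckets, sort each by name, concatenate, dedup."""
--     buckets = ([], [], [], [])
--     for row in rows:
--         n = row["Method"]
--         low = n.lower()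
--         if "zeroproofml (full)" in low:
--             b = 0
--         elif "zeroproofml (basic)" in low:
--             b = 1
--         elif "no clip" in low:
--             b = 2
--         elif "+clip" in low or "clip" in low:
--             b = 3
--         else:
--             b = 0
--         buckets[b].append(n)
--     seen = set()
--     out = []
--     for bucket in buckets:
--         for n in sorted(bucket):
--             if n not in seen:
--                 seen.add(n)
--                 out.append(n)
--     return out
-- ===== Notes on version B (the rewrite author's own statement) =====
-- stated objective: alternative
-- what changed: Replaces the composite-(priority,name)-key sort of the whole keyed list by a single-pass partition into four priority buckets, a plain per-bucket sort by name, and concatenation in bucket order 0..3, with the same seen-set dedup.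
import Mathlib
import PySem

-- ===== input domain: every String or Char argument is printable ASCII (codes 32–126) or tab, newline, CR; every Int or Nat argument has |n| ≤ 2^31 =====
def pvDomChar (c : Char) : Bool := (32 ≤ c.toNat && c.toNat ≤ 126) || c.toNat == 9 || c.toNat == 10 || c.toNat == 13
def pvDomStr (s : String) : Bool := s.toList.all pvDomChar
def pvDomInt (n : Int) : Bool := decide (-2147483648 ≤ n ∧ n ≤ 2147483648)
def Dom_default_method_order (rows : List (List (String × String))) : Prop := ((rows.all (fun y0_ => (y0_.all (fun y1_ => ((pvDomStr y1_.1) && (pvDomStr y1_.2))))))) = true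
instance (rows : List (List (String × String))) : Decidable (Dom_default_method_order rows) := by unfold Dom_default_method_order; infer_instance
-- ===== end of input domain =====

-- B partitions the method names into the four priority buckets in one pass, sorts each bucket by
-- name, concatenates in bucket order and dedups — instead of A's single composite-key sort
-- (objective: alternative; return values proved equal on all rows that carry a "Method" key).


-- ===== PORT A =====
-- A's elif chain producing the composite sort key (priority, name); 'key = (0, n)' is the initial
-- assignment and the final catch-all alike.
def pvKeyOfA (n : String) : Int × String :=
  let low := PySem.Str.lower n
  if PySem.Str.isIn "zeroproofml (full)" low then (0, n)
  else if PySem.Str.isIn "zeroproofml (basic)" low then (1, n)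
  else if PySem.Str.isIn "no clip" low then (2, n)
  else if PySem.Str.isIn "+clip" low || PySem.Str.isIn "clip" low then (3, n)
  else (0, n)

def default_method_order (rows : List (List (String × String))) : List String :=
  let names : List String := rows.map (fun row => (PySem.Dict.mk row).getD "Method" "")
  let priority : List ((Int × String) × String) :=
    names.foldl (fun acc n => acc ++ [(pvKeyOfA n, n)]) []
  let sortedP := PySem.List.sorted2 priority (fun x => x.1.1) (fun x => x.1.2)
  let ordered := sortedP.map (fun x => x.2)
  (ordered.foldl
      (fun (st : PySem.Set String × List String) n =>
        if PySem.Set.contains st.1 n then st else (PySem.Set.add st.1 n, st.2 ++ [n]))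
      (PySem.Set.empty, [])).2

-- ===== PORT B =====
-- B's elif chain: just the bucket number 0..3.
def pvBucketOfB (n : String) : Int :=
  let low := PySem.Str.lower n
  if PySem.Str.isIn "zeroproofml (full)" low then 0
  else if PySem.Str.isIn "zeroproofml (basic)" low then 1
  else if PySem.Str.isIn "no clip" low then 2
  else if PySem.Str.isIn "+clip" low || PySem.Str.isIn "clip" low then 3
  else 0

-- the inner 'for n in sorted(bucket): if n not in seen: …' loop, threading (seen, out)
def pvDedupInto (st : PySem.Set String × List String) (ns : List String) :
    PySem.Set String × List String :=
  ns.foldl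
    (fun (st : PySem.Set String × List String) n =>
      if PySem.Set.contains st.1 n then st else (PySem.Set.add st.1 n, st.2 ++ [n]))
    st

def default_method_order_alt (rows : List (List (String × String))) : List String :=
  let bk :=
    rows.foldl
      (fun (bk : List String × List String × List String × List String) row =>
        let n := (PySem.Dict.mk row).getD "Method" ""
        let b := pvBucketOfB n
        if b = 0 then (bk.1 ++ [n], bk.2.1, bk.2.2.1, bk.2.2.2)
        else if b = 1 then (bk.1, bk.2.1 ++ [n], bk.2.2.1, bk.2.2.2)
        else if b = 2 then (bk.1, bk.2.1, bk.2.2.1 ++ [n], bk.2.2.2)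
        else (bk.1, bk.2.1, bk.2.2.1, bk.2.2.2 ++ [n]))
      ([], [], [], [])
  let st0 := pvDedupInto (PySem.Set.empty, []) (PySem.List.sorted bk.1 (fun x => x))
  let st1 := pvDedupInto st0 (PySem.List.sorted bk.2.1 (fun x => x))
  let st2 := pvDedupInto st1 (PySem.List.sorted bk.2.2.1 (fun x => x))
  let st3 := pvDedupInto st2 (PySem.List.sorted bk.2.2.2 (fun x => x))
  st3.2

-- ===== PRECONDITION & SPEC =====
-- Pre_ excludes exactly the rows without a "Method" key, on which A (row["Method"]) raises KeyError.
def Pre_default_method_order (rows : List (List (String × String))) : Prop :=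
  (rows.all (fun row => (PySem.Dict.mk row).contains "Method")) = true
instance (rows : List (List (String × String))) : Decidable (Pre_default_method_order rows) := by unfold Pre_default_method_order; infer_instance

def pvWitness_default_method_order : (List (List (String × String))) :=
  [[("Method", "ZeroProofML (Full)")], [("Method", "Rational+Clip")]]

def Spec_default_method_order (rows : List (List (String × String))) (out : List String) : Prop := out = default_method_order_alt rows
instance (rows : List (List (String × String))) (out : List String) : Decidable (Spec_default_method_order rows out) := by unfold Spec_default_method_order; infer_instance

-- ===== CLAIM (what is proved, stated in full; the proofs are below) =====
def Claim_equal_default_method_order : Prop := ∀ (rows : List (List (String × String))), Dom_default_method_order rows → Pre_default_method_order rows → Spec_default_method_order rows (default_method_order rows)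

-- ===== LEMMAS AND PROOFS =====

-- the lexicographic name key both sides order by
def pvNameKey (n : String) : Lex (Int × String) := toLex (pvBucketOfB n, n)

theorem pvKeyOfA_eq (n : String) : pvKeyOfA n = (pvBucketOfB n, n) := by
  unfold pvKeyOfA pvBucketOfB
  dsimp only
  split_ifs <;> rfl

theorem pvBucketOfB_cases (n : String) :
    pvBucketOfB n = 0 ∨ pvBucketOfB n = 1 ∨ pvBucketOfB n = 2 ∨ pvBucketOfB n = 3 := by
  unfold pvBucketOfB
  dsimp only
  split_ifs <;> simp

-- sorted2 with a pair key is sorted by the lexicographic order on the pair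
theorem pvSorted2_eq_sorted_lex {α κ₁ κ₂ : Type} [LinearOrder κ₁] [LinearOrder κ₂]
    (xs : List α) (k1 : α → κ₁) (k2 : α → κ₂) :
    PySem.List.sorted2 xs k1 k2 = PySem.List.sorted xs (fun x => toLex (k1 x, k2 x)) := by
  rw [PySem.List.sorted_eq_foldl_insertBy]
  show List.foldl (fun acc x => PySem.List.insertBy _ x acc) [] xs = _
  have hpred :
      (fun a b => decide (k1 a < k1 b) || (!decide (k1 b < k1 a) && decide (k2 a < k2 b)))
        = (fun a b : α => decide ((toLex (k1 a, k2 a)) < toLex (k1 b, k2 b))) := by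
    funext a b
    by_cases h1 : k1 a < k1 b <;> by_cases h2 : k1 b < k1 a
    · exact absurd h2 (lt_asymm h1)
    · simp [h1, h2, Prod.Lex.lt_iff]
    · have : ¬ (k1 a = k1 b) := fun h => absurd (h ▸ h2) (lt_irrefl _)
      simp [h1, h2, Prod.Lex.lt_iff, this]
    · have heq : k1 a = k1 b := le_antisymm (not_lt.mp h2) (not_lt.mp h1)
      simp [Prod.Lex.lt_iff, heq]
  rw [hpred]
  rfl

theorem pvDedupInto_append (st : PySem.Set String × List String) (xs ys : List String) :
    pvDedupInto (pvDedupInto st xs) ys = pvDedupInto st (xs ++ ys) := by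
  unfold pvDedupInto
  rw [List.foldl_append]

-- B's partition loop lands each name in the bucket of its priority
theorem pvBucketsFold (rows : List (List (String × String)))
    (a0 a1 a2 a3 : List String) :
    rows.foldl
      (fun (bk : List String × List String × List String × List String) row =>
        let n := (PySem.Dict.mk row).getD "Method" ""
        let b := pvBucketOfB n
        if b = 0 then (bk.1 ++ [n], bk.2.1, bk.2.2.1, bk.2.2.2)
        else if b = 1 then (bk.1, bk.2.1 ++ [n], bk.2.2.1, bk.2.2.2)
        else if b = 2 then (bk.1, bk.2.1, bk.2.2.1 ++ [n], bk.2.2.2)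
        else (bk.1, bk.2.1, bk.2.2.1, bk.2.2.2 ++ [n]))
      (a0, a1, a2, a3)
      = (a0 ++ (rows.map (fun row => (PySem.Dict.mk row).getD "Method" "")).filter
                 (fun n => pvBucketOfB n == 0),
         a1 ++ (rows.map (fun row => (PySem.Dict.mk row).getD "Method" "")).filter
                 (fun n => pvBucketOfB n == 1),
         a2 ++ (rows.map (fun row => (PySem.Dict.mk row).getD "Method" "")).filter
                 (fun n => pvBucketOfB n == 2),
         a3 ++ (rows.map (fun row => (PySem.Dict.mk row).getD "Method" "")).filter
                 (fun n => pvBucketOfB n == 3)) := by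
  induction rows generalizing a0 a1 a2 a3 with
  | nil => simp
  | cons r rs ih =>
    simp only [List.foldl_cons, List.map_cons, List.filter_cons]
    rcases pvBucketOfB_cases ((PySem.Dict.mk r).getD "Method" "") with h | h | h | h <;>
      simp [h, ih, List.append_assoc]

-- the four bucket filters together are a permutation of the names
theorem pvPartitionPerm (ns : List String) :
    (ns.filter (fun n => pvBucketOfB n == 0) ++ ns.filter (fun n => pvBucketOfB n == 1)
      ++ ns.filter (fun n => pvBucketOfB n == 2) ++ ns.filter (fun n => pvBucketOfB n == 3)).Perm
      ns := by
  induction ns with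
  | nil => simp
  | cons n ns ih =>
    rcases pvBucketOfB_cases n with h | h | h | h
    · simp only [List.filter_cons, h]
      norm_num
      simp only [← List.append_assoc]
      exact ih
    · simp only [List.filter_cons, h]
      norm_num
      refine List.Perm.trans ?_ (ih.cons n)
      simp only [List.append_assoc]
      exact List.perm_middle
    · simp only [List.filter_cons, h]
      norm_num
      refine List.Perm.trans ?_ (ih.cons n)
      simp only [List.append_assoc]
      exact (List.Perm.append_left _ List.perm_middle).trans List.perm_middle
    · simp only [List.filter_cons, h]
      norm_num
      refine List.Perm.trans ?_ (ih.cons n)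
      simp only [List.append_assoc]
      exact ((List.Perm.append_left _ (List.Perm.append_left _ List.perm_middle)).trans
        ((List.Perm.append_left _ List.perm_middle).trans List.perm_middle))

-- ordered names from A's sort = B's concatenation of per-bucket sorts
theorem pvOrdered_eq (ns : List String) :
    (PySem.List.sorted2 (ns.map (fun n => (pvKeyOfA n, n)))
        (fun x => x.1.1) (fun x => x.1.2)).map (fun x => x.2)
      = PySem.List.sorted (ns.filter (fun n => pvBucketOfB n == 0)) (fun x => x)
        ++ PySem.List.sorted (ns.filter (fun n => pvBucketOfB n == 1)) (fun x => x)
        ++ PySem.List.sorted (ns.filter (fun n => pvBucketOfB n == 2)) (fun x => x)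
        ++ PySem.List.sorted (ns.filter (fun n => pvBucketOfB n == 3)) (fun x => x) := by
  rw [pvSorted2_eq_sorted_lex]
  set priority := ns.map (fun n => (pvKeyOfA n, n)) with hprio
  set keyL : (Int × String) × String → Lex (Int × String) := fun x => toLex (x.1.1, x.1.2)
    with hkeyL
  have hform : ∀ x ∈ priority, keyL x = pvNameKey x.2 := by
    intro x hx
    rw [hprio] at hx
    rcases List.mem_map.mp hx with ⟨n, _, rfl⟩
    simp [hkeyL, pvKeyOfA_eq, pvNameKey]
  -- antisymmetry of the name key
  have hanti : ∀ a b : String, pvNameKey a ≤ pvNameKey b → pvNameKey b ≤ pvNameKey a → a = b := by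
    intro a b h1 h2
    have h := le_antisymm h1 h2
    have := congrArg (fun x : Lex (Int × String) => (ofLex x).2) h
    simpa [pvNameKey] using this
  apply List.Perm.eq_of_pairwise (le := fun a b => pvNameKey a ≤ pvNameKey b)
  · intro a b _ _ h1 h2; exact hanti a b h1 h2
  · -- left side is pairwise ordered by the name key
    apply List.pairwise_map.mpr
    refine List.Pairwise.imp_of_mem ?_ (PySem.List.sorted_pairwise priority keyL)
    intro a b ha hb h
    rw [PySem.List.mem_sorted] at ha hb
    rw [hform a ha, hform b hb] at h
    exact h
  · -- right side: within buckets by the name, across buckets by the bucket index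
    have hin : ∀ (i : Int), ∀ a ∈ PySem.List.sorted (ns.filter (fun n => pvBucketOfB n == i))
        (fun x => x), pvBucketOfB a = i := by
      intro i a ha
      rw [PySem.List.mem_sorted] at ha
      simpa using List.of_mem_filter ha
    have hpair : ∀ (i : Int), List.Pairwise (fun a b => pvNameKey a ≤ pvNameKey b)
        (PySem.List.sorted (ns.filter (fun n => pvBucketOfB n == i)) (fun x => x)) := by
      intro i
      refine List.Pairwise.imp_of_mem ?_
        (PySem.List.sorted_pairwise (ns.filter (fun n => pvBucketOfB n == i)) (fun x => x))
      intro a b ha hb hab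
      have h1 := hin i a ha
      have h2 := hin i b hb
      rw [Prod.Lex.le_iff]
      right
      exact ⟨by simp [pvNameKey, h1, h2], by simpa [pvNameKey] using hab⟩
    have hcross : ∀ (i j : Int), i < j →
        ∀ a, pvBucketOfB a = i → ∀ b, pvBucketOfB b = j → pvNameKey a ≤ pvNameKey b := by
      intro i j hij a ha b hb
      rw [Prod.Lex.le_iff]
      left
      simp [pvNameKey, ha, hb, hij]
    have hmem4 : ∀ a, (a ∈ PySem.List.sorted (ns.filter (fun n => pvBucketOfB n == 0)) (fun x => x)
          ∨ a ∈ PySem.List.sorted (ns.filter (fun n => pvBucketOfB n == 1)) (fun x => x)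
          ∨ a ∈ PySem.List.sorted (ns.filter (fun n => pvBucketOfB n == 2)) (fun x => x)) →
        pvBucketOfB a ≤ 2 := by
      intro a ha
      rcases ha with ha | ha | ha
      · rw [hin 0 a ha]; norm_num
      · rw [hin 1 a ha]; norm_num
      · rw [hin 2 a ha]
    simp only [List.pairwise_append, List.mem_append]
    refine ⟨⟨⟨hpair 0, hpair 1, ?_⟩, hpair 2, ?_⟩, hpair 3, ?_⟩
    · intro a ha b hb
      exact hcross 0 1 (by norm_num) a (hin 0 a ha) b (hin 1 b hb)
    · intro a ha b hb
      rcases ha with ha | ha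
      · exact hcross 0 2 (by norm_num) a (hin 0 a ha) b (hin 2 b hb)
      · exact hcross 1 2 (by norm_num) a (hin 1 a ha) b (hin 2 b hb)
    · intro a ha b hb
      have h2 : pvBucketOfB a ≤ 2 := by
        rcases ha with (ha | ha) | ha
        · exact hmem4 a (Or.inl ha)
        · exact hmem4 a (Or.inr (Or.inl ha))
        · exact hmem4 a (Or.inr (Or.inr ha))
      exact hcross (pvBucketOfB a) 3 (by omega) a rfl b (hin 3 b hb)
  · -- both sides are permutations of the names
    have hL : ((PySem.List.sorted priority keyL).map (fun x => x.2)).Perm ns := by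
      refine List.Perm.trans (List.Perm.map _ (PySem.List.sorted_perm priority keyL false)) ?_
      rw [hprio]
      have : (ns.map (fun n => (pvKeyOfA n, n))).map (fun x => x.2) = ns := by
        simp [Function.comp_def]
      rw [this]
    have hR : (PySem.List.sorted (ns.filter (fun n => pvBucketOfB n == 0)) (fun x => x)
        ++ PySem.List.sorted (ns.filter (fun n => pvBucketOfB n == 1)) (fun x => x)
        ++ PySem.List.sorted (ns.filter (fun n => pvBucketOfB n == 2)) (fun x => x)
        ++ PySem.List.sorted (ns.filter (fun n => pvBucketOfB n == 3)) (fun x => x)).Perm ns := by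
      refine List.Perm.trans ?_ (pvPartitionPerm ns)
      exact List.Perm.append (List.Perm.append (List.Perm.append
        (PySem.List.sorted_perm _ _ false) (PySem.List.sorted_perm _ _ false))
        (PySem.List.sorted_perm _ _ false)) (PySem.List.sorted_perm _ _ false)
    exact hL.trans hR.symm

-- ===== VERDICT (by name: the statement is the Claim_ definition above) =====
theorem default_method_order_spec : Claim_equal_default_method_order := by
  intro rows _ _
  show default_method_order rows = default_method_order_alt rows
  unfold default_method_order default_method_order_alt
  rw [pvBucketsFold]
  simp only [List.nil_append]
  rw [PySem.List.foldl_append_singleton_eq_map, List.nil_append]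
  rw [pvOrdered_eq]
  show (pvDedupInto (PySem.Set.empty, []) (_ ++ _ ++ _ ++ _)).2 = _
  rw [pvDedupInto_append, pvDedupInto_append, pvDedupInto_append]
  simp only [List.append_assoc]
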